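-- pv_equiv track=rewrite | github.com/richlanc/KaraKara | website/karakara/templates/helpers.py | tag_hireachy
-- ===== SOURCE A (Python) =====
-- def tag_hireachy(tags, tag):
--     """
--     >>> tag_hireachy(_test_tags, 'from')
--     'macross: dynamite'
--     >>> tag_hireachy(_test_tags, 'category')
--     'anime, jpop'
--     """
--     if tag not in tags:
--         return ''
--     tag_value = ', '.join(tags[tag])
--     subtag_value = tag_hireachy(tags, tag_value)
--     if tag_value and subtag_value:
--         return '{0}: {1}'.format(tag_value, subtag_value)
--     return tag_value
-- ===== SOURCE B (Python) =====
-- def tag_hireachy(tags, tag):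
--     joined = {key: ', '.join(values) for key, values in tags.items()}
--     out = joined.get(tag, '')
--     cur = out
--     while cur:
--         nxt = joined.get(cur, '')
--         if nxt:
--             out += ': ' + nxt
--         cur = nxt
--     return out
-- ===== Notes on version B (the rewrite author's own statement) =====
-- stated objective: alternative
-- what changed: Replaces A's recursion by a two-stage iterative version: first precompute a dict mapping every key to its joined value, then walk the chain with a string accumulator, concatenating ': ' + next at each step.
import Mathlib
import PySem

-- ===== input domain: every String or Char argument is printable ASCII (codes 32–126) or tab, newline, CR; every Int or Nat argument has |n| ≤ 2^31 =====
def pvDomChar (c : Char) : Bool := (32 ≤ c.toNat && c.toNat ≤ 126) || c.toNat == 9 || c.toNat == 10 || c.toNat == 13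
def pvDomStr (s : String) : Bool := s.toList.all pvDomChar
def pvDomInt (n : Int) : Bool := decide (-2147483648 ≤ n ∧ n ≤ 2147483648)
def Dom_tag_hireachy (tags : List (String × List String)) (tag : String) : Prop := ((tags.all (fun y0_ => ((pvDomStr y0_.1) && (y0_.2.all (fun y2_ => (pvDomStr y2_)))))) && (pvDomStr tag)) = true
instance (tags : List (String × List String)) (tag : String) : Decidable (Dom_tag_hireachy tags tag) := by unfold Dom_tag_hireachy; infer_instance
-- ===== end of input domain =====

-- B precomputes a dict of joined values once and then walks the chain iteratively with a string
-- accumulator (alternative decomposition, same cost). Equivalence is about the return value; on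
-- cyclic tag graphs (excluded by Pre_) Python A raises RecursionError.

-- ===== PORT A =====
-- The recursion is fuelled with tags.length + 1, which is enough whenever the chain of lookups is acyclic
-- (each successful lookup visits a key of tags; without a cycle no key repeats).
def tagAgo (tags : List (String × List String)) : Nat → String → String
  | 0, _ => ""
  | n+1, tag =>
    match PySem.Dict.get? (PySem.Dict.mk tags) tag with
    | none => ""                                       -- if tag not in tags: return ''
    | some vs =>
      let tag_value := PySem.Str.join ", " vs          -- tag_value = ', '.join(tags[tag])
      let subtag_value := tagAgo tags n tag_value      -- subtag_value = tag_hireachy(tags, tag_value)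
      if tag_value ≠ "" ∧ subtag_value ≠ "" then tag_value ++ ": " ++ subtag_value
      else tag_value

def tag_hireachy (tags : List (String × List String)) (tag : String) : String :=
  tagAgo tags (tags.length + 1) tag

-- ===== PORT B =====
-- while cur: nxt = joined.get(cur, ''); if nxt: out += ': ' + nxt; cur = nxt
-- The loop is fuelled with tags.length + 2; under Pre_ it stops before the fuel runs out.
def tagWalk (joined : PySem.Dict String String) : Nat → String → String → String
  | 0, out, _ => out
  | n+1, out, cur =>
    if cur = "" then out
    else
      let nxt := PySem.Dict.getD joined cur ""
      tagWalk joined n (if nxt ≠ "" then out ++ ": " ++ nxt else out) nxt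

def tag_hireachy_alt (tags : List (String × List String)) (tag : String) : String :=
  let joined := PySem.Dict.mk (tags.map (fun kv => (kv.1, PySem.Str.join ", " kv.2)))
  let out := PySem.Dict.getD joined tag ""             -- out = joined.get(tag, '')
  tagWalk joined (tags.length + 2) out out             -- cur = out; while loop; return out

-- ===== PRECONDITION & SPEC =====
-- one lookup-and-join step in the key → ', '.join(value) graph of tags
def pvStep (tags : List (String × List String)) (s : String) : Option String :=
  (PySem.Dict.get? (PySem.Dict.mk tags) s).map (fun vs => PySem.Str.join ", " vs)

def pvIter (tags : List (String × List String)) : Nat → String → Option String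
  | 0, s => some s
  | n+1, s => (pvStep tags s).bind (pvIter tags n)

-- Pre_ excludes exactly the inputs on which Python A raises RecursionError: those where the chain of
-- lookups tag -> ', '.join(tags[tag]) -> ... never leaves the keys of tags (i.e. runs into a cycle).
-- The chain terminates iff it does so within tags.length+1 steps, since an acyclic chain visits distinct keys.
def Pre_tag_hireachy (tags : List (String × List String)) (tag : String) : Prop :=
  pvIter tags (tags.length + 1) tag = none

instance (tags : List (String × List String)) (tag : String) : Decidable (Pre_tag_hireachy tags tag) := by
  unfold Pre_tag_hireachy; infer_instance

def pvWitness_tag_hireachy : (List (String × List String)) × String :=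
  ([("from", ["macross"]), ("macross", ["dynamite"])], "from")

def Spec_tag_hireachy (tags : List (String × List String)) (tag : String) (out : String) : Prop := out = tag_hireachy_alt tags tag
instance (tags : List (String × List String)) (tag : String) (out : String) : Decidable (Spec_tag_hireachy tags tag out) := by unfold Spec_tag_hireachy; infer_instance

-- ===== CLAIM (what is proved, stated in full; the proofs are below) =====
def Claim_equal_tag_hireachy : Prop := ∀ (tags : List (String × List String)) (tag : String), Dom_tag_hireachy tags tag → Pre_tag_hireachy tags tag → Spec_tag_hireachy tags tag (tag_hireachy tags tag)

-- ===== LEMMAS AND PROOFS =====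

-- the list of chain parts both programs assemble (proof helper only)
def pvParts (tags : List (String × List String)) : Nat → String → List String
  | 0, _ => []
  | n+1, cur =>
    match PySem.Dict.get? (PySem.Dict.mk tags) cur with
    | none => []
    | some vs =>
      let v := PySem.Str.join ", " vs
      if v = "" then [] else v :: pvParts tags n v

-- B's walk, without the accumulator (proof helper only); stops additionally on cur = ""
def pvSfold : List String → String
  | [] => ""
  | p :: ps => ": " ++ p ++ pvSfold ps

theorem pvParts_ne_nil (tags : List (String × List String)) :
    ∀ n cur, ∀ x ∈ pvParts tags n cur, x ≠ "" := by
  intro n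
  induction n with
  | zero => intro cur x hx; simp [pvParts] at hx
  | succ n ih =>
    intro cur x hx
    simp only [pvParts] at hx
    cases h : PySem.Dict.get? (PySem.Dict.mk tags) cur with
    | none => rw [h] at hx; simp at hx
    | some vs =>
      rw [h] at hx
      simp only at hx
      by_cases hv : PySem.Str.join ", " vs = ""
      · simp [hv] at hx
      · simp [hv] at hx
        rcases hx with rfl | hx
        · exact hv
        · exact ih _ _ hx

theorem join_colon_nil : PySem.Str.join ": " [] = "" := by
  rw [← String.toList_inj]
  simp [PySem.Str.toList_join, PySem.Chars.join, List.intercalate]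

theorem join_colon_singleton (a : String) : PySem.Str.join ": " [a] = a := by
  rw [← String.toList_inj]
  simp [PySem.Str.toList_join, PySem.Chars.join_singleton]

theorem join_colon_cons (a b : String) (l : List String) :
    PySem.Str.join ": " (a :: b :: l) = a ++ ": " ++ PySem.Str.join ": " (b :: l) := by
  rw [← String.toList_inj]
  simp [PySem.Str.toList_join, PySem.Chars.join_cons_cons]

theorem join_colon_ne_empty (a : String) (l : List String) (ha : a ≠ "") :
    PySem.Str.join ": " (a :: l) ≠ "" := by
  intro h
  have h' := congrArg String.toList h
  rw [PySem.Str.toList_join] at h'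
  cases l with
  | nil =>
    apply ha
    rw [← String.toList_inj]
    simpa [PySem.Chars.join_singleton] using h'
  | cons b bs =>
    rw [List.map_cons, List.map_cons, PySem.Chars.join_cons_cons] at h'
    simp at h'

-- join with ": " of a nonempty list is the head followed by the sfold of the tail
theorem join_colon_eq_sfold (a : String) (l : List String) :
    PySem.Str.join ": " (a :: l) = a ++ pvSfold l := by
  induction l generalizing a with
  | nil => simp [pvSfold, join_colon_singleton]
  | cons b bs ih =>
    rw [join_colon_cons, ih b]
    simp [pvSfold, String.append_assoc]

theorem tagAgo_eq_join (tags : List (String × List String)) :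
    ∀ n cur, tagAgo tags n cur = PySem.Str.join ": " (pvParts tags n cur) := by
  intro n
  induction n with
  | zero => intro cur; simp [tagAgo, pvParts, join_colon_nil]
  | succ n ih =>
    intro cur
    simp only [tagAgo, pvParts]
    cases h : PySem.Dict.get? (PySem.Dict.mk tags) cur with
    | none => simp [join_colon_nil]
    | some vs =>
      simp only
      by_cases hve : PySem.Str.join ", " vs = ""
      · simp [hve, join_colon_nil]
      · rw [if_neg hve]
        cases hp : pvParts tags n (PySem.Str.join ", " vs) with
        | nil =>
          have hs : tagAgo tags n (PySem.Str.join ", " vs) = "" := by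
            rw [ih, hp, join_colon_nil]
          simp [hs, hve, join_colon_singleton]
        | cons b bs =>
          have hb : b ≠ "" :=
            pvParts_ne_nil tags n _ b (by rw [hp]; exact List.mem_cons_self ..)
          have hs : tagAgo tags n (PySem.Str.join ", " vs) = PySem.Str.join ": " (b :: bs) := by
            rw [ih, hp]
          have hne : tagAgo tags n (PySem.Str.join ", " vs) ≠ "" := by
            rw [hs]; exact join_colon_ne_empty b bs hb
          rw [if_pos ⟨hve, hne⟩, hs, join_colon_cons]

-- lookup in the mapped dict is the mapped lookup
theorem getD_mk_map_join (tags : List (String × List String)) (cur : String) :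
    PySem.Dict.getD (PySem.Dict.mk (tags.map (fun kv => (kv.1, PySem.Str.join ", " kv.2)))) cur ""
      = (match PySem.Dict.get? (PySem.Dict.mk tags) cur with
         | none => ""
         | some vs => PySem.Str.join ", " vs) := by
  rw [PySem.Dict.getD_eq_get?_getD]
  induction tags with
  | nil => simp [PySem.Dict.get?]
  | cons kv rest ih =>
    simp only [List.map_cons]
    rw [PySem.Dict.get?_mk_cons, PySem.Dict.get?_mk_cons]
    by_cases h : kv.1 == cur
    · simp [h]
    · simp only [h, Bool.false_eq_true, if_false]
      exact ih

-- the walk never moves from the empty string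
theorem tagWalk_empty (j : PySem.Dict String String) :
    ∀ n out, tagWalk j n out "" = out := by
  intro n out
  cases n <;> simp [tagWalk]

-- B's walk appends the sfold of the chain parts to its accumulator
theorem tagWalk_eq_sfold (tags : List (String × List String)) :
    ∀ n out cur, cur ≠ "" →
      tagWalk (PySem.Dict.mk (tags.map (fun kv => (kv.1, PySem.Str.join ", " kv.2)))) n out cur
        = out ++ pvSfold (pvParts tags n cur) := by
  intro n
  induction n with
  | zero => intro out cur _; simp [tagWalk, pvParts, pvSfold]
  | succ n ih =>
    intro out cur hcur
    simp only [tagWalk, if_neg hcur]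
    rw [getD_mk_map_join]
    simp only [pvParts]
    cases h : PySem.Dict.get? (PySem.Dict.mk tags) cur with
    | none => simp [tagWalk_empty, pvSfold]
    | some vs =>
      simp only
      by_cases hve : PySem.Str.join ", " vs = ""
      · simp [hve, tagWalk_empty, pvSfold]
      · rw [if_neg hve, if_pos hve, ih _ _ hve]
        simp [pvSfold, String.append_assoc]

-- once the chain dies within n steps, more fuel does not change the parts
theorem pvParts_stable (tags : List (String × List String)) :
    ∀ n s m, pvIter tags n s = none → n ≤ m → pvParts tags m s = pvParts tags n s := by
  intro n
  induction n with
  | zero => intro s m h; simp [pvIter] at h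
  | succ n ih =>
    intro s m h hle
    obtain ⟨m', rfl⟩ : ∃ m', m = m' + 1 := ⟨m - 1, by omega⟩
    simp only [pvIter, pvStep] at h
    simp only [pvParts]
    cases hg : PySem.Dict.get? (PySem.Dict.mk tags) s with
    | none => rfl
    | some vs =>
      rw [hg] at h
      simp only [Option.map_some, Option.bind_some] at h
      simp only
      by_cases hve : PySem.Str.join ", " vs = ""
      · simp [hve]
      · rw [if_neg hve, if_neg hve, ih _ m' h (by omega)]

-- ===== VERDICT (by name: the statement is the Claim_ definition above) =====
theorem tag_hireachy_spec : Claim_equal_tag_hireachy := by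
  intro tags tag _ hpre
  unfold Spec_tag_hireachy tag_hireachy tag_hireachy_alt
  rw [tagAgo_eq_join]
  simp only
  rw [getD_mk_map_join]
  cases hg : PySem.Dict.get? (PySem.Dict.mk tags) tag with
  | none =>
    simp only [pvParts, hg]
    rw [tagWalk_empty, join_colon_nil]
  | some vs =>
    simp only
    by_cases hve : PySem.Str.join ", " vs = ""
    · have hparts : pvParts tags (tags.length + 1) tag = [] := by
        simp [pvParts, hg, hve]
      rw [hparts, join_colon_nil, hve, tagWalk_empty]
    · have hiter : pvIter tags (tags.length) (PySem.Str.join ", " vs) = none := by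
        unfold Pre_tag_hireachy at hpre
        simpa [pvIter, pvStep, hg] using hpre
      have hparts : pvParts tags (tags.length + 1) tag
          = PySem.Str.join ", " vs :: pvParts tags tags.length (PySem.Str.join ", " vs) := by
        simp only [pvParts, hg, if_neg hve]
      rw [tagWalk_eq_sfold tags _ _ _ hve, hparts, join_colon_eq_sfold,
          pvParts_stable tags tags.length (PySem.Str.join ", " vs) (tags.length + 2) hiter
            (by omega)]
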